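-- pv_equiv track=rewrite | github.com/progmat64/algo_train_yandex_1 | hw_2/task_2.py | determine_sequence_type
-- ===== SOURCE A (Python) =====
-- def determine_sequence_type(sequence):
--     if len(set(sequence)) == 1:
--         return "CONSTANT"
--     elif all(sequence[i] < sequence[i + 1] for i in range(len(sequence) - 1)):
--         return "ASCENDING"
--     elif all(sequence[i] <= sequence[i + 1] for i in range(len(sequence) - 1)):
--         return "WEAKLY ASCENDING"
--     elif all(sequence[i] > sequence[i + 1] for i in range(len(sequence) - 1)):
--         return "DESCENDING"
--     elif all(sequence[i] >= sequence[i + 1] for i in range(len(sequence) - 1)):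
--         return "WEAKLY DESCENDING"
--     else:
--         return "RANDOM"
-- ===== SOURCE B (Python) =====
-- def determine_sequence_type(sequence):
--     # constant guard kept verbatim (also preserves TypeError on unhashable input)
--     if len(set(sequence)) == 1:
--         return "CONSTANT"
--     asc = wasc = desc = wdesc = True
--     for a, b in zip(sequence, sequence[1:]):
--         asc = asc and a < b
--         wasc = wasc and a <= b
--         desc = desc and b < a
--         wdesc = wdesc and b <= a
--     if asc:
--         return "ASCENDING"
--     if wasc:
--         return "WEAKLY ASCENDING"
--     if desc:
--         return "DESCENDING"
--     if wdesc:
--         return "WEAKLY DESCENDING"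
--     return "RANDOM"
-- ===== Notes on version B (the rewrite author's own statement) =====
-- stated objective: alternative
-- what changed: Replaces A's four separate index-based all(...) passes over range(len-1) with one single pass over zip(sequence, sequence[1:]) maintaining four monotonicity flags, then picks the answer in priority order.
import Mathlib
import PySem

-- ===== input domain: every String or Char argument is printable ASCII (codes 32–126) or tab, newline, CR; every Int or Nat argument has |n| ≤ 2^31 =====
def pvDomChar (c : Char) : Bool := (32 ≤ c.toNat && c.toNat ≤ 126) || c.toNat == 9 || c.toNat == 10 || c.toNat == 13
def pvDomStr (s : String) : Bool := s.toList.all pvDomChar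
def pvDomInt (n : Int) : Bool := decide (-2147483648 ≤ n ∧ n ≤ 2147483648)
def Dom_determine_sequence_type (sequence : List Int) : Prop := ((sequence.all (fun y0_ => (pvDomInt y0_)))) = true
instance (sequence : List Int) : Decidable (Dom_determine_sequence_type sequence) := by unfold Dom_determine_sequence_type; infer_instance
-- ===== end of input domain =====

-- B replaces A's four separate index-based all(...) passes with one single flag-maintaining pass over adjacent pairs (same O(n) cost, different traversal/decomposition).

-- ===== PORT A =====
-- all indices i, i+1 drawn from range(len-1) are in range, so sequence[i] is ported as pyGetD (exact there)
def determine_sequence_type (sequence : List Int) : String :=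
  if PySem.Set.len (PySem.Set.ofList sequence) = 1 then "CONSTANT"
  else if (PySem.List.pyRange 0 (PySem.List.len sequence - 1) 1).all
      (fun i => decide (PySem.List.pyGetD sequence i 0 < PySem.List.pyGetD sequence (i+1) 0)) then "ASCENDING"
  else if (PySem.List.pyRange 0 (PySem.List.len sequence - 1) 1).all
      (fun i => decide (PySem.List.pyGetD sequence i 0 ≤ PySem.List.pyGetD sequence (i+1) 0)) then "WEAKLY ASCENDING"
  else if (PySem.List.pyRange 0 (PySem.List.len sequence - 1) 1).all
      (fun i => decide (PySem.List.pyGetD sequence (i+1) 0 < PySem.List.pyGetD sequence i 0)) then "DESCENDING"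
  else if (PySem.List.pyRange 0 (PySem.List.len sequence - 1) 1).all
      (fun i => decide (PySem.List.pyGetD sequence (i+1) 0 ≤ PySem.List.pyGetD sequence i 0)) then "WEAKLY DESCENDING"
  else "RANDOM"

-- ===== PORT B =====
-- sequence[1:] is ported as drop 1 (PySem.List.slice_from_one)
def determine_sequence_type_alt (sequence : List Int) : String :=
  if PySem.Set.len (PySem.Set.ofList sequence) = 1 then "CONSTANT"
  else
    let flags := (sequence.zip (sequence.drop 1)).foldl
      (fun (st : Bool × Bool × Bool × Bool) p =>
        (st.1 && decide (p.1 < p.2), st.2.1 && decide (p.1 ≤ p.2),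
         st.2.2.1 && decide (p.2 < p.1), st.2.2.2 && decide (p.2 ≤ p.1)))
      (true, true, true, true)
    if flags.1 then "ASCENDING"
    else if flags.2.1 then "WEAKLY ASCENDING"
    else if flags.2.2.1 then "DESCENDING"
    else if flags.2.2.2 then "WEAKLY DESCENDING"
    else "RANDOM"

-- ===== PRECONDITION & SPEC =====
def Spec_determine_sequence_type (sequence : List Int) (out : String) : Prop := out = determine_sequence_type_alt sequence
instance (sequence : List Int) (out : String) : Decidable (Spec_determine_sequence_type sequence out) := by unfold Spec_determine_sequence_type; infer_instance

-- ===== CLAIM (what is proved, stated in full; the proofs are below) =====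
def Claim_equal_determine_sequence_type : Prop := ∀ (sequence : List Int), Dom_determine_sequence_type sequence → Spec_determine_sequence_type sequence (determine_sequence_type sequence)

-- ===== LEMMAS AND PROOFS =====

-- A's index-based all over range(len-1) equals an all over adjacent pairs (Nat-index form)
lemma allAdj_eq_zip (f : Int → Int → Bool) : ∀ (xs : List Int),
    (List.range (xs.length - 1)).all (fun k => f (xs.getD k 0) (xs.getD (k+1) 0))
      = (xs.zip (xs.drop 1)).all (fun p => f p.1 p.2) := by
  intro xs
  induction xs with
  | nil => simp
  | cons x xs ih =>
    cases xs with
    | nil => simp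
    | cons y t =>
      have h := ih
      simp only [List.length_cons, Nat.add_sub_cancel] at h ⊢
      rw [List.range_succ_eq_map]
      simp only [List.all_cons, List.all_map]
      simp only [List.getD_cons_zero, List.getD_cons_succ, List.drop_succ_cons, List.drop_zero,
        List.zip_cons_cons, List.all_cons] at h ⊢
      rw [← h]
      rfl

-- pyRange/pyGetD form of the same fact
lemma allAdj_py_eq_zip (f : Int → Int → Bool) (xs : List Int) :
    (PySem.List.pyRange 0 (PySem.List.len xs - 1) 1).all
        (fun i => f (PySem.List.pyGetD xs i 0) (PySem.List.pyGetD xs (i+1) 0))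
      = (xs.zip (xs.drop 1)).all (fun p => f p.1 p.2) := by
  rw [PySem.List.pyRange_one, ← allAdj_eq_zip f xs]
  simp only [List.all_map, PySem.List.len_eq, zero_add, Int.sub_zero]
  have hn : ((xs.length : Int) - 1).toNat = xs.length - 1 := by omega
  rw [hn]
  congr 1
  funext k
  have h1 : ((k : Int) + 1) = ((k + 1 : Nat) : Int) := by push_cast; ring
  simp only [Function.comp_apply, h1, PySem.List.pyGetD_natCast]

-- the single flag-folding pass computes the four alls at once
lemma flag_foldl (l : List (Int × Int)) (a b c d : Bool) :
    l.foldl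
      (fun (st : Bool × Bool × Bool × Bool) p =>
        (st.1 && decide (p.1 < p.2), st.2.1 && decide (p.1 ≤ p.2),
         st.2.2.1 && decide (p.2 < p.1), st.2.2.2 && decide (p.2 ≤ p.1)))
      (a, b, c, d)
      = (a && l.all (fun p => decide (p.1 < p.2)), b && l.all (fun p => decide (p.1 ≤ p.2)),
         c && l.all (fun p => decide (p.2 < p.1)), d && l.all (fun p => decide (p.2 ≤ p.1))) := by
  induction l generalizing a b c d with
  | nil => simp
  | cons p l ih => simp [ih, Bool.and_assoc]

-- ===== VERDICT (by name: the statement is the Claim_ definition above) =====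
theorem determine_sequence_type_spec : Claim_equal_determine_sequence_type := by
  intro sequence _
  unfold Spec_determine_sequence_type determine_sequence_type determine_sequence_type_alt
  rw [flag_foldl]
  simp only [Bool.true_and]
  rw [allAdj_py_eq_zip (fun x y => decide (x < y)),
      allAdj_py_eq_zip (fun x y => decide (x ≤ y)),
      allAdj_py_eq_zip (fun x y => decide (y < x)),
      allAdj_py_eq_zip (fun x y => decide (y ≤ x))]
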